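-- pv_equiv track=rewrite | github.com/qianxiao996/Super-PortScan | Super-PortScan.py | diff_of_two_list
-- ===== SOURCE A (Python) =====
-- def diff_of_two_list(list1,list2):
--     for value in list2:
--         try:
--             value = int(value)
--             if value in list1:
--                 list1.remove(value)
--         except:
--             pass
--     return list1
-- ===== SOURCE B (Python) =====
-- def diff_of_two_list(list1, list2):
--     # Build a removal-count table from list2 once, then filter list1 in one pass.
--     # Mutates list1 in place (list1[:] = ...) and returns it, like the original.
--     need = {}
--     for value in list2:
--         try:
--             v = int(value)
--         except:
--             continue
--         need[v] = need.get(v, 0) + 1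
--     result = []
--     for x in list1:
--         c = need.get(x, 0)
--         if c > 0:
--             need[x] = c - 1
--         else:
--             result.append(x)
--     list1[:] = result
--     return list1
-- ===== Notes on version B (the rewrite author's own statement) =====
-- stated objective: alternative
-- what changed: Replaces list2-driven repeated 'in'/.remove scans of list1 with a removal-count table built in one pass over list2 followed by a single filtering pass over list1 (list1[:] = result keeps the in-place mutation).
import Mathlib
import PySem

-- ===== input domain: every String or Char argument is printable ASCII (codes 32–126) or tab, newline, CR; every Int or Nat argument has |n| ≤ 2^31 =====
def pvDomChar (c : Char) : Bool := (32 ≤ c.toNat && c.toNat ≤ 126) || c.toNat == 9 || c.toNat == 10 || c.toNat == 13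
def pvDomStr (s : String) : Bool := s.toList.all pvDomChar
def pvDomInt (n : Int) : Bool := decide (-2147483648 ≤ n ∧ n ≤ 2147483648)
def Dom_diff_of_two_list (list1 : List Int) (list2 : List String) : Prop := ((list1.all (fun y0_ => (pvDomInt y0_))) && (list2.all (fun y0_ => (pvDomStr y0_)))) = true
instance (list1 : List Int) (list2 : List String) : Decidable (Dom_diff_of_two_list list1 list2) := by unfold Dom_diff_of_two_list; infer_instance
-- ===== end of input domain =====

-- B replaces A's per-list2-element 'in'/.remove scans of list1 by a removal-count
-- table built once from list2 plus a single filtering pass over list1.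
-- Both A and B mutate list1 in place and return it; the equivalence proved here
-- is about the returned value (which is also the final state of list1 in both).

-- ===== PORT A =====
def diff_of_two_list (list1 : List Int) (list2 : List String) : List Int :=
  list2.foldl (fun l s =>
    match PySem.Int.ofStr? s with
    | none => l                                   -- except: pass
    | some v => if v ∈ l then (PySem.List.remove? l v).getD l else l) list1

-- ===== PORT B =====
-- the for-value-in-list2 loop of Source B building the count table `need`
def pvBuildNeed (list2 : List String) : PySem.Dict Int Int :=
  list2.foldl (fun d s =>
    match PySem.Int.ofStr? s with
    | none => d                                   -- except: continue
    | some v => d.insert v (d.getD v 0 + 1)) PySem.Dict.empty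

-- the for-x-in-list1 filtering loop of Source B (result built front-to-back)
def pvFilterNeed : List Int → PySem.Dict Int Int → List Int
  | [], _ => []
  | x :: xs, d =>
    let c := d.getD x 0
    if c > 0 then pvFilterNeed xs (d.insert x (c - 1))
    else x :: pvFilterNeed xs d

def diff_of_two_list_alt (list1 : List Int) (list2 : List String) : List Int :=
  pvFilterNeed list1 (pvBuildNeed list2)

-- ===== PRECONDITION & SPEC =====
def Spec_diff_of_two_list (list1 : List Int) (list2 : List String) (out : List Int) : Prop := out = diff_of_two_list_alt list1 list2
instance (list1 : List Int) (list2 : List String) (out : List Int) : Decidable (Spec_diff_of_two_list list1 list2 out) := by unfold Spec_diff_of_two_list; infer_instance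

-- ===== CLAIM (what is proved, stated in full; the proofs are below) =====
def Claim_equal_diff_of_two_list : Prop := ∀ (list1 : List Int) (list2 : List String), Dom_diff_of_two_list list1 list2 → Spec_diff_of_two_list list1 list2 (diff_of_two_list list1 list2)

-- ===== LEMMAS AND PROOFS =====

-- Abstract middle ground: filter a list by a Nat-valued count function.
def pvFilterF : List Int → (Int → Nat) → List Int
  | [], _ => []
  | x :: xs, c =>
    if 0 < c x then pvFilterF xs (fun w => if w = x then c x - 1 else c w)
    else x :: pvFilterF xs c

def pvBump (c : Int → Nat) (v : Int) : Int → Nat := fun w => if w = v then c w + 1 else c w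

def pvCnt (list2 : List String) : Int → Nat := fun v => (list2.filterMap PySem.Int.ofStr?).count v

theorem pvFilterF_zero (l : List Int) : pvFilterF l (fun _ => 0) = l := by
  induction l with
  | nil => rfl
  | cons x xs ih => simp [pvFilterF, ih]

theorem pvFilterF_bump_not_mem (l : List Int) (c : Int → Nat) (v : Int) (hv : v ∉ l) :
    pvFilterF l (pvBump c v) = pvFilterF l c := by
  induction l generalizing c with
  | nil => rfl
  | cons x xs ih =>
    have hxv : x ≠ v := fun h => hv (h ▸ List.mem_cons_self ..)
    have hvxs : v ∉ xs := fun h => hv (List.mem_cons_of_mem _ h)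
    have hcx : pvBump c v x = c x := by simp [pvBump, hxv]
    by_cases h : 0 < c x
    · rw [pvFilterF, pvFilterF, if_pos (hcx ▸ h), if_pos h]
      have : (fun w => if w = x then pvBump c v x - 1 else pvBump c v w)
           = pvBump (fun w => if w = x then c x - 1 else c w) v := by
        funext w
        by_cases hwx : w = x <;> by_cases hwv : w = v <;>
          simp_all [pvBump, hxv]
      rw [this, ih _ hvxs]
    · rw [pvFilterF, pvFilterF, if_neg (hcx ▸ h), if_neg h, ih _ hvxs]

theorem pvFilterF_erase (l : List Int) (c : Int → Nat) (v : Int) (hv : v ∈ l) :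
    pvFilterF (l.erase v) c = pvFilterF l (pvBump c v) := by
  induction l generalizing c with
  | nil => cases hv
  | cons x xs ih =>
    by_cases hxv : x = v
    · subst hxv
      rw [List.erase_cons_head]
      have hpos : 0 < pvBump c x x := by simp [pvBump]
      rw [pvFilterF, if_pos hpos]
      have : (fun w => if w = x then pvBump c x x - 1 else pvBump c x w) = c := by
        funext w; by_cases hwx : w = x <;> simp [pvBump, hwx]
      rw [this]
    · have hvxs : v ∈ xs := by
        rcases List.mem_cons.mp hv with h | h
        · exact absurd h.symm hxv
        · exact h
      rw [List.erase_cons_tail (by simp [hxv])]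
      have hcx : pvBump c v x = c x := by simp [pvBump, hxv]
      by_cases h : 0 < c x
      · rw [pvFilterF, pvFilterF, if_pos h, if_pos (hcx ▸ h)]
        have : pvBump (fun w => if w = x then c x - 1 else c w) v
             = (fun w => if w = x then pvBump c v x - 1 else pvBump c v w) := by
          funext w
          by_cases hwx : w = x <;> by_cases hwv : w = v <;>
            simp_all [pvBump, hxv]
        rw [ih _ hvxs, this]
      · rw [pvFilterF, pvFilterF, if_neg h, if_neg (hcx ▸ h), ih _ hvxs]

-- A computes the count-function filter.
theorem portA_eq_filterF (list2 : List String) (list1 : List Int) :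
    diff_of_two_list list1 list2 = pvFilterF list1 (pvCnt list2) := by
  induction list2 generalizing list1 with
  | nil => simpa [diff_of_two_list, pvCnt] using (pvFilterF_zero list1).symm
  | cons s l2 ih =>
    rw [diff_of_two_list, List.foldl_cons, ← diff_of_two_list, ih]
    cases hps : PySem.Int.ofStr? s with
    | none =>
      have : pvCnt (s :: l2) = pvCnt l2 := by
        funext w; simp [pvCnt, List.filterMap_cons, hps]
      rw [this]
    | some v =>
      have hcnt : pvCnt (s :: l2) = pvBump (pvCnt l2) v := by
        funext w
        simp only [pvCnt, pvBump, List.filterMap_cons, hps, List.count_cons]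
        by_cases hwv : w = v <;>
          simp [hwv, show ∀ h : ¬ w = v, ¬ v = w from fun h h' => h h'.symm]
      rw [hcnt]
      dsimp only
      by_cases hv : v ∈ list1
      · rw [if_pos hv, PySem.List.remove?_eq_some_erase list1 v hv, Option.getD_some,
          pvFilterF_erase _ _ _ hv]
      · rw [if_neg hv, pvFilterF_bump_not_mem _ _ _ hv]

-- The count table built by B holds exactly pvCnt (as Int), over any start dict.
theorem pvBuildNeed_getD (list2 : List String) (d : PySem.Dict Int Int) (v : Int) :
    (list2.foldl (fun d s =>
      match PySem.Int.ofStr? s with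
      | none => d
      | some w => d.insert w (d.getD w 0 + 1)) d).getD v 0
      = d.getD v 0 + ((list2.filterMap PySem.Int.ofStr?).count v : Int) := by
  induction list2 generalizing d with
  | nil => simp
  | cons s l2 ih =>
    rw [List.foldl_cons]
    cases hps : PySem.Int.ofStr? s with
    | none => simp [hps, ih, List.filterMap_cons]
    | some w =>
      rw [ih]
      by_cases hvw : v = w
      · subst hvw
        simp [List.filterMap_cons, hps, PySem.Dict.getD_insert, List.count_cons]
        ring
      · simp [PySem.Dict.getD_insert, List.filterMap_cons, hps, List.count_cons, hvw,
          show ¬ w = v from fun h => hvw h.symm]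

-- B's filtering loop agrees with the abstract filter when the dict is pointwise
-- the Nat count (coerced to Int).
theorem pvFilterNeed_eq_filterF (l : List Int) (d : PySem.Dict Int Int) (c : Int → Nat)
    (h : ∀ v, d.getD v 0 = (c v : Int)) :
    pvFilterNeed l d = pvFilterF l c := by
  induction l generalizing d c with
  | nil => rfl
  | cons x xs ih =>
    rw [pvFilterNeed, pvFilterF]
    simp only [h x]
    by_cases hpos : 0 < c x
    · rw [if_pos (by exact_mod_cast hpos), if_pos hpos]
      refine ih _ _ (fun v => ?_)
      rw [PySem.Dict.getD_insert]
      by_cases hvx : v = x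
      · rw [if_pos hvx, hvx, if_pos rfl]
        omega
      · rw [if_neg hvx, if_neg hvx, h]
    · rw [if_neg (by exact_mod_cast hpos), if_neg hpos, ih _ _ h]

-- ===== VERDICT (by name: the statement is the Claim_ definition above) =====
theorem diff_of_two_list_spec : Claim_equal_diff_of_two_list := by
  intro list1 list2 _
  unfold Spec_diff_of_two_list diff_of_two_list_alt
  rw [portA_eq_filterF]
  refine (pvFilterNeed_eq_filterF _ _ _ (fun v => ?_)).symm
  rw [pvBuildNeed]
  rw [pvBuildNeed_getD list2 PySem.Dict.empty v]
  simp [pvCnt]
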